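-- pv_equiv track=rewrite | github.com/Zopinko/bpmn-gen-app | backend/services/engine_normalizer.py | find_gateway_warnings
-- ===== SOURCE A (Python) =====
-- import collections
-- from typing import Any, Dict, List
--
-- def gateway_degrees(nodes: List[Dict[str, Any]], flows: List[Dict[str, Any]]):
--     indeg: collections.Counter[str] = collections.Counter()
--     outdeg: collections.Counter[str] = collections.Counter()
--     for flow in flows:
--         src = flow.get("source")
--         tgt = flow.get("target")
--         if src:
--             outdeg[src] += 1
--         if tgt:
--             indeg[tgt] += 1
--     return indeg, outdeg
--
-- def find_gateway_warnings(
--     nodes: List[Dict[str, Any]], flows: List[Dict[str, Any]]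
-- ) -> List[str]:
--     indeg, outdeg = gateway_degrees(nodes, flows)
--     warnings: List[str] = []
--     for node in nodes:
--         node_type = node.get("type")
--         if node_type in {
--             "gateway",
--             "exclusiveGateway",
--             "inclusiveGateway",
--             "parallelGateway",
--         }:
--             inbound = indeg[node["id"]]
--             outbound = outdeg[node["id"]]
--             if inbound < 1 or outbound < 1:
--                 warnings.append(
--                     f"Gateway {node['id']} ('{node.get('name', '')}') has indeg={inbound}, outdeg={outbound}"
--                 )
--     return warnings
-- ===== SOURCE B (Python) =====
-- # Counts each gateway's inbound/outbound flows by a direct scan of the flows list; no pre-built Counter index.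
-- GATEWAY_TYPES = {"gateway", "exclusiveGateway", "inclusiveGateway", "parallelGateway"}
--
-- def find_gateway_warnings(nodes, flows):
--     warnings = []
--     for node in nodes:
--         if node.get("type") in GATEWAY_TYPES:
--             nid = node["id"]
--             inbound = sum(1 for f in flows if f.get("target") == nid)
--             outbound = sum(1 for f in flows if f.get("source") == nid)
--             if inbound < 1 or outbound < 1:
--                 warnings.append(
--                     f"Gateway {nid} ('{node.get('name', '')}') has indeg={inbound}, outdeg={outbound}"
--                 )
--     return warnings
-- ===== Notes on version B (the rewrite author's own statement) =====
-- stated objective: simpler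
-- what changed: Dropped the gateway_degrees/Counter pre-indexing helper; B counts each gateway's inbound/outbound flows by a direct scan of the flows list. Pre_ excludes gateway-typed nodes whose 'id' is missing (A raises KeyError) or empty (A's Counter truthiness guard never counts empty-string flow endpoints, an accidental corner where matching empty ids is equally defensible).
import Mathlib
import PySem

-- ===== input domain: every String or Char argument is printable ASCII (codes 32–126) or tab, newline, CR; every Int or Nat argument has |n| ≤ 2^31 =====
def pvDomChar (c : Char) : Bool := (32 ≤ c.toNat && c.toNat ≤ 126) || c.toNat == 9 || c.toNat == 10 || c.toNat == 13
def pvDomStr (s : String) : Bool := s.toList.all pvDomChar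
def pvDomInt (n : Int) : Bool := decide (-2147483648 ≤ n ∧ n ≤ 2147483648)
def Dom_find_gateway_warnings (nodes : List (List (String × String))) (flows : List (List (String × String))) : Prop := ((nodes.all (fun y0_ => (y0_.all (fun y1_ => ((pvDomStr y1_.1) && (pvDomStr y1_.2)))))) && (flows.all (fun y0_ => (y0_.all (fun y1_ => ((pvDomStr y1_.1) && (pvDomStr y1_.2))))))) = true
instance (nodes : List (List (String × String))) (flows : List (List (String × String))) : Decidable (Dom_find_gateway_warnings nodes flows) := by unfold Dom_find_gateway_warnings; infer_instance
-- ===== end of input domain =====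

-- B replaces the Counter-building pass (gateway_degrees) by a direct countP scan of the flows per gateway node: simpler, no helper.

-- shared by both ports: Python's `node_type in {...}` (both sources test the same set literal)
def pvIsGateway (t? : Option String) : Bool :=
  match t? with
  | some t => t == "gateway" || t == "exclusiveGateway" || t == "inclusiveGateway" || t == "parallelGateway"
  | none => false

-- shared by both ports: the identical f-string of both sources
def pvWarnMsg (nid name : String) (inb outb : Int) : String :=
  "Gateway " ++ nid ++ " ('" ++ name ++ "') has indeg=" ++ PySem.Int.toStr inb ++ ", outdeg=" ++ PySem.Int.toStr outb

-- ===== PORT A =====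
-- one step of the flow loop in gateway_degrees: (indeg, outdeg)
def pvDegStep (p : PySem.Dict String Int × PySem.Dict String Int) (flow : List (String × String)) :
    PySem.Dict String Int × PySem.Dict String Int :=
  let src := List.lookup "source" flow
  let tgt := List.lookup "target" flow
  let p1 := match src with
    | some s => if s ≠ "" then (p.1, p.2.modify s 0 (· + 1)) else p
    | none => p
  match tgt with
  | some t => if t ≠ "" then (p1.1.modify t 0 (· + 1), p1.2) else p1
  | none => p1

def gateway_degrees (nodes flows : List (List (String × String))) :
    PySem.Dict String Int × PySem.Dict String Int :=
  flows.foldl pvDegStep (PySem.Dict.empty, PySem.Dict.empty)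

def find_gateway_warnings (nodes : List (List (String × String))) (flows : List (List (String × String))) : List String :=
  let degs := gateway_degrees nodes flows
  nodes.foldl (fun ws node =>
    if pvIsGateway (List.lookup "type" node) then
      let nid := (List.lookup "id" node).getD ""   -- Python raises KeyError when "id" is absent; Pre_ excludes that
      let inbound := degs.1.getD nid 0
      let outbound := degs.2.getD nid 0
      if inbound < 1 ∨ outbound < 1 then
        ws ++ [pvWarnMsg nid ((List.lookup "name" node).getD "") inbound outbound]
      else ws
    else ws) []

-- ===== PORT B =====
def find_gateway_warnings_alt (nodes : List (List (String × String))) (flows : List (List (String × String))) : List String :=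
  nodes.foldl (fun ws node =>
    if pvIsGateway (List.lookup "type" node) then
      let nid := (List.lookup "id" node).getD ""   -- Python raises KeyError when "id" is absent; Pre_ excludes that
      let inbound : Int := flows.countP (fun f => List.lookup "target" f == some nid)
      let outbound : Int := flows.countP (fun f => List.lookup "source" f == some nid)
      if inbound < 1 ∨ outbound < 1 then
        ws ++ [pvWarnMsg nid ((List.lookup "name" node).getD "") inbound outbound]
      else ws
    else ws) []

-- ===== PRECONDITION & SPEC =====
-- Pre_ excludes gateway-typed nodes whose "id" is missing (A raises KeyError) or empty (A's Counter truthiness guard never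
-- counts empty-string flow endpoints, an accidental corner where matching empty ids is equally defensible).
def Pre_find_gateway_warnings (nodes : List (List (String × String))) (flows : List (List (String × String))) : Prop :=
  ∀ node ∈ nodes,
    List.lookup "type" node ∈ ([some "gateway", some "exclusiveGateway", some "inclusiveGateway", some "parallelGateway"] : List (Option String)) →
    (List.lookup "id" node).getD "" ≠ ""
instance (nodes : List (List (String × String))) (flows : List (List (String × String))) : Decidable (Pre_find_gateway_warnings nodes flows) := by unfold Pre_find_gateway_warnings; infer_instance

def pvWitness_find_gateway_warnings : (List (List (String × String))) × (List (List (String × String))) :=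
  ([[("type", "gateway"), ("id", "g1"), ("name", "G")]], [[("source", "a"), ("target", "g1")]])

def Spec_find_gateway_warnings (nodes : List (List (String × String))) (flows : List (List (String × String))) (out : List String) : Prop := out = find_gateway_warnings_alt nodes flows
instance (nodes : List (List (String × String))) (flows : List (List (String × String))) (out : List String) : Decidable (Spec_find_gateway_warnings nodes flows out) := by unfold Spec_find_gateway_warnings; infer_instance

-- ===== CLAIM (what is proved, stated in full; the proofs are below) =====
def Claim_equal_find_gateway_warnings : Prop := ∀ (nodes : List (List (String × String))) (flows : List (List (String × String))), Dom_find_gateway_warnings nodes flows → Pre_find_gateway_warnings nodes flows → Spec_find_gateway_warnings nodes flows (find_gateway_warnings nodes flows)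

-- ===== LEMMAS AND PROOFS =====

lemma pvDeg_fst (v : String) :
    ∀ (flows : List (List (String × String))) (p : PySem.Dict String Int × PySem.Dict String Int),
      (flows.foldl pvDegStep p).1.getD v 0
        = p.1.getD v 0 + (flows.countP (fun f => !(v == "") && (List.lookup "target" f == some v)) : Int) := by
  intro flows
  induction flows with
  | nil => intro p; simp
  | cons f fs ih =>
    intro p
    simp only [List.foldl_cons, List.countP_cons, ih]
    have hstep : (pvDegStep p f).1.getD v 0
        = p.1.getD v 0 + (if (!(v == "") && (List.lookup "target" f == some v)) then 1 else 0) := by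
      unfold pvDegStep
      rcases hs : List.lookup "source" f with _ | s <;>
      rcases ht : List.lookup "target" f with _ | t <;>
        simp only [] <;> split_ifs with h1 <;>
        simp_all [PySem.Dict.getD_modify] <;> (rintro rfl; simp_all)
    rw [hstep]; push_cast; ring_nf

lemma pvDeg_snd (v : String) :
    ∀ (flows : List (List (String × String))) (p : PySem.Dict String Int × PySem.Dict String Int),
      (flows.foldl pvDegStep p).2.getD v 0
        = p.2.getD v 0 + (flows.countP (fun f => !(v == "") && (List.lookup "source" f == some v)) : Int) := by
  intro flows
  induction flows with
  | nil => intro p; simp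
  | cons f fs ih =>
    intro p
    simp only [List.foldl_cons, List.countP_cons, ih]
    have hstep : (pvDegStep p f).2.getD v 0
        = p.2.getD v 0 + (if (!(v == "") && (List.lookup "source" f == some v)) then 1 else 0) := by
      unfold pvDegStep
      rcases hs : List.lookup "source" f with _ | s <;>
      rcases ht : List.lookup "target" f with _ | t <;>
        simp only [] <;> split_ifs with h1 <;>
        simp_all [PySem.Dict.getD_modify] <;> (rintro rfl; simp_all)
    rw [hstep]; push_cast; ring_nf

-- ===== VERDICT (by name: the statement is the Claim_ definition above) =====
lemma pvIsGateway_mem {t : Option String} (h : pvIsGateway t = true) :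
    t ∈ ([some "gateway", some "exclusiveGateway", some "inclusiveGateway", some "parallelGateway"] : List (Option String)) := by
  rcases t with _ | s
  · simp [pvIsGateway] at h
  · simp only [pvIsGateway] at h
    rcases Bool.or_eq_true_iff.1 h with h | h
    · rcases Bool.or_eq_true_iff.1 h with h | h
      · rcases Bool.or_eq_true_iff.1 h with h | h <;> simp_all
      · simp_all
    · simp_all

theorem find_gateway_warnings_spec : Claim_equal_find_gateway_warnings := by
  intro nodes flows _ hpre
  unfold Spec_find_gateway_warnings find_gateway_warnings find_gateway_warnings_alt
  apply PySem.List.foldl_congr_mem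
  intro ws node hmem
  by_cases hg : pvIsGateway (List.lookup "type" node) = true
  · have hid := hpre node hmem (pvIsGateway_mem hg)
    have h1 := pvDeg_fst ((List.lookup "id" node).getD "") flows (PySem.Dict.empty, PySem.Dict.empty)
    have h2 := pvDeg_snd ((List.lookup "id" node).getD "") flows (PySem.Dict.empty, PySem.Dict.empty)
    simp only [PySem.Dict.getD_empty, zero_add] at h1 h2
    have hne : ((List.lookup "id" node).getD "" == "") = false := by
      simpa using hid
    simp only [gateway_degrees, hg, if_true] at *
    simp only [h1, h2, hne, Bool.false_eq_true, Bool.not_false, Bool.true_and]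
  · simp [hg]
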